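-- pv_equiv track=rewrite | github.com/DmitryBondarevApple/Noteall_E | backend/app/utils/__init__.py | build_input_from_map
-- ===== SOURCE A (Python) =====
-- def build_input_from_map(edges: list) -> dict:
--     """Build a map of node_id -> [source_node_ids] from an edges list.
--
--     Given edges like [{"source": "A", "target": "B"}, {"source": "B", "target": "C"}],
--     returns {"B": ["A"], "C": ["B"]}.
--     """
--     result = {}
--     for e in edges:
--         target = e.get("target")
--         source = e.get("source")
--         if target and source:
--             if target not in result:
--                 result[target] = []
--             if source not in result[target]:
--                 result[target].append(source)
--     return result
-- ===== SOURCE B (Python) =====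
-- def build_input_from_map(edges: list) -> dict:
--     """Build a map of node_id -> [source_node_ids] from an edges list.
--
--     Flatten edges to valid (target, source) pairs, take the distinct targets
--     in first-occurrence order, then collect each target's distinct sources by
--     filtering the pair list -- no incremental dict is maintained.
--     """
--     valid = [(e.get("target"), e.get("source")) for e in edges]
--     valid = [(t, s) for t, s in valid if t and s]
--     targets = list(dict.fromkeys(t for t, _ in valid))
--     return {t: list(dict.fromkeys(s for u, s in valid if u == t))
--             for t in targets}
-- ===== Notes on version B (the rewrite author's own statement) =====
-- stated objective: alternative
-- what changed: B maintains no dict while scanning: it flattens edges to a list of valid (target, source) pairs, takes the distinct targets in first-occurrence order, and builds each value by filtering the pair list per target and deduplicating; A builds the dict incrementally with inline key-existence and membership checks.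
import Mathlib
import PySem

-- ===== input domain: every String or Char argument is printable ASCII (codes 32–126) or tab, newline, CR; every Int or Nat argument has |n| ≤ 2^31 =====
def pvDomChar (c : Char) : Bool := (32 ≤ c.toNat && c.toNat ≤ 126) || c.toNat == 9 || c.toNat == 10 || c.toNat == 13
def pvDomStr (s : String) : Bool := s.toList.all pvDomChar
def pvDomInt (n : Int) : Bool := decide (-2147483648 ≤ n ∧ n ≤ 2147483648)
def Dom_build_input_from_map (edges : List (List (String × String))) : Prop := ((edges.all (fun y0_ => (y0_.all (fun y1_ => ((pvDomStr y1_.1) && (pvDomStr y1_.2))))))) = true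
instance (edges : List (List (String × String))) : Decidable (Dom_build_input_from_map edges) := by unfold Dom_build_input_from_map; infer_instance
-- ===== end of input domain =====

-- B keeps no dict while scanning: it flattens edges to valid (target, source)
-- pairs, then builds each target's group by filtering; objective: alternative.

-- ===== PORT A =====
-- one iteration of A's loop body
def buildStepA (result : PySem.Dict String (List String)) (e : List (String × String)) :
    PySem.Dict String (List String) :=
  let target := (PySem.Dict.mk e).get? "target"
  let source := (PySem.Dict.mk e).get? "source"
  match target, source with
  | some t, some s =>
    if t ≠ "" ∧ s ≠ "" then
      let result := if result.contains t then result else result.insert t []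
      if s ∈ result.getD t [] then result else result.insert t (result.getD t [] ++ [s])
    else result
  | _, _ => result

def build_input_from_map (edges : List (List (String × String))) : List (String × List String) :=
  (edges.foldl buildStepA PySem.Dict.empty).items

-- ===== PORT B =====
-- [(e.get("target"), e.get("source")) for e in edges] filtered by 'if t and s'
def validPairs (edges : List (List (String × String))) : List (String × String) :=
  ((edges.map (fun e => ((PySem.Dict.mk e).get? "target", (PySem.Dict.mk e).get? "source"))).filterMap
    (fun p => match p with
      | (some t, some s) => if t ≠ "" ∧ s ≠ "" then some (t, s) else none
      | _ => none))

def build_input_from_map_alt (edges : List (List (String × String))) : List (String × List String) :=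
  let valid := validPairs edges
  let targets := PySem.List.dedup (valid.map Prod.fst)   -- list(dict.fromkeys(...))
  targets.map (fun t =>
    (t, PySem.List.dedup ((valid.filter (fun p => p.1 == t)).map Prod.snd)))

-- ===== PRECONDITION & SPEC =====
def Spec_build_input_from_map (edges : List (List (String × String))) (out : List (String × List String)) : Prop := out = build_input_from_map_alt edges
instance (edges : List (List (String × String))) (out : List (String × List String)) : Decidable (Spec_build_input_from_map edges out) := by unfold Spec_build_input_from_map; infer_instance

-- ===== CLAIM (what is proved, stated in full; the proofs are below) =====
def Claim_equal_build_input_from_map : Prop := ∀ (edges : List (List (String × String))), Dom_build_input_from_map edges → Spec_build_input_from_map edges (build_input_from_map edges)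

-- ===== LEMMAS AND PROOFS =====

-- A's loop body restricted to an already-extracted valid pair
def stepP (d : PySem.Dict String (List String)) (p : String × String) :
    PySem.Dict String (List String) :=
  let d1 := if d.contains p.1 then d else d.insert p.1 []
  if p.2 ∈ d1.getD p.1 [] then d1 else d1.insert p.1 (d1.getD p.1 [] ++ [p.2])

-- B's closed-form description of a dict built from a pair list
def F (ps : List (String × String)) : List (String × List String) :=
  (PySem.List.dedup (ps.map Prod.fst)).map (fun t =>
    (t, PySem.List.dedup ((ps.filter (fun p => p.1 == t)).map Prod.snd)))

theorem dedup_snoc (v : List String) (s : String) :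
    PySem.List.dedup (v ++ [s]) =
      if s ∈ PySem.List.dedup v then PySem.List.dedup v else PySem.List.dedup v ++ [s] := by
  simp [PySem.List.dedup_eq_ofList, PySem.Set.ofList_eq_foldl, List.foldl_append, PySem.Set.add]

-- A's fold over edges is the fold of stepP over the valid pairs
theorem foldA_eq_foldP (edges : List (List (String × String)))
    (d : PySem.Dict String (List String)) :
    edges.foldl buildStepA d = (validPairs edges).foldl stepP d := by
  induction edges generalizing d with
  | nil => rfl
  | cons e es ih =>
    rw [List.foldl_cons, ih]
    unfold validPairs
    simp only [List.map_cons, List.filterMap_cons]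
    unfold buildStepA
    cases (PySem.Dict.mk e).get? "target" with
    | none => rfl
    | some t =>
      cases (PySem.Dict.mk e).get? "source" with
      | none => rfl
      | some s =>
        by_cases hg : t ≠ "" ∧ s ≠ ""
        · simp only [if_pos hg, List.foldl_cons]
          rfl
        · simp only [if_neg hg]

-- filtering for a key that never occurs gives []
theorem filter_fst_nil (ps : List (String × String)) (t : String)
    (h : t ∉ ps.map Prod.fst) : ps.filter (fun q => q.1 == t) = [] := by
  rw [List.filter_eq_nil_iff]
  intro q hq
  simp only [beq_iff_eq]
  intro he
  exact h (he ▸ List.mem_map_of_mem hq)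

-- appending a pair with a different key does not change the filter
theorem filter_snoc_ne (ps : List (String × String)) (t s u : String) (h : u ≠ t) :
    (ps ++ [(t, s)]).filter (fun q => q.1 == u) = ps.filter (fun q => q.1 == u) := by
  rw [List.filter_append]
  simp [Ne.symm h]

-- one stepP step preserves the F characterization
theorem stepP_F (ps : List (String × String)) (d : PySem.Dict String (List String))
    (h : d.items = F ps) (p : String × String) :
    (stepP d p).items = F (ps ++ [p]) := by
  obtain ⟨t, s⟩ := p
  have hk : d.keys = PySem.List.dedup (ps.map Prod.fst) := by
    simp only [PySem.Dict.keys, h, F, List.map_map]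
    exact (List.map_congr_left (fun a _ => rfl)).trans (List.map_id _)
  have hN : d.keys.Nodup := by rw [hk]; exact PySem.List.nodup_dedup _
  have hfst : (ps ++ [(t, s)]).map Prod.fst = ps.map Prod.fst ++ [t] := by simp
  unfold stepP
  by_cases hmem : t ∈ ps.map Prod.fst
  · -- target already a key
    have hc : d.contains t = true := by
      rw [PySem.Dict.contains_eq_decide_mem_keys, hk]
      simp [hmem]
    have hded : PySem.List.dedup ((ps ++ [(t, s)]).map Prod.fst)
        = PySem.List.dedup (ps.map Prod.fst) := by
      rw [hfst, dedup_snoc, if_pos (by simpa [PySem.List.mem_dedup] using hmem)]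
    have hitem : (t, PySem.List.dedup ((ps.filter (fun q => q.1 == t)).map Prod.snd)) ∈ d.items := by
      rw [h]
      exact List.mem_map.mpr ⟨t, by simpa [PySem.List.mem_dedup] using hmem, rfl⟩
    have hg : d.getD t [] = PySem.List.dedup ((ps.filter (fun q => q.1 == t)).map Prod.snd) :=
      PySem.Dict.getD_of_mem_items d hitem hN []
    simp only [hc, if_true, hg]
    by_cases hs : s ∈ PySem.List.dedup ((ps.filter (fun q => q.1 == t)).map Prod.snd)
    · -- source already recorded: nothing changes
      rw [if_pos hs, h]
      unfold F
      rw [hded]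
      apply List.map_congr_left
      intro u hu
      by_cases hut : u = t
      · subst hut
        rw [List.filter_append]
        simp only [List.filter_cons, List.filter_nil, beq_self_eq_true, if_true]
        rw [List.map_append, List.map_cons, List.map_nil, dedup_snoc, if_pos hs]
      · rw [filter_snoc_ne ps t s u hut]
    · -- new source appended at key t
      rw [if_neg hs, PySem.Dict.items_insert_of_contains d _ hc, h]
      unfold F
      rw [hded, List.map_map]
      apply List.map_congr_left
      intro u hu
      by_cases hut : u = t
      · subst hut
        simp only [Function.comp_apply, beq_self_eq_true, if_true]
        rw [List.filter_append]
        simp only [List.filter_cons, List.filter_nil, beq_self_eq_true, if_true]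
        rw [List.map_append, List.map_cons, List.map_nil, dedup_snoc, if_neg hs]
      · have hbe : (u == t) = false := by simpa using hut
        simp only [Function.comp_apply, hbe, Bool.false_eq_true, if_false]
        rw [filter_snoc_ne ps t s u hut]
  · -- fresh target
    have hc : d.contains t = false := by
      rw [PySem.Dict.contains_eq_decide_mem_keys, hk]
      simp [hmem]
    simp only [hc, Bool.false_eq_true, if_false]
    rw [PySem.Dict.getD_insert_self]
    simp only [List.not_mem_nil, if_false, List.nil_append]
    rw [PySem.Dict.insert_insert_self, PySem.Dict.items_insert_of_not_contains d _ hc, h]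
    unfold F
    rw [hfst, dedup_snoc, if_neg (by simpa [PySem.List.mem_dedup] using hmem),
      List.map_append, List.map_cons, List.map_nil]
    congr 1
    · apply List.map_congr_left
      intro u hu
      have hut : u ≠ t := by
        intro he
        exact hmem (he ▸ ((PySem.List.mem_dedup _ _).mp hu))
      rw [filter_snoc_ne ps t s u hut]
    · rw [List.filter_append, filter_fst_nil ps t hmem]
      simp only [List.nil_append, List.filter_cons, List.filter_nil, beq_self_eq_true, if_true]
      rfl

theorem foldP_F (ps : List (String × String)) :
    (ps.foldl stepP PySem.Dict.empty).items = F ps := by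
  induction ps using List.reverseRecOn with
  | nil => rfl
  | append_singleton ps p ih =>
    rw [List.foldl_append]
    exact stepP_F ps _ ih p

-- ===== VERDICT (by name: the statement is the Claim_ definition above) =====
theorem build_input_from_map_spec : Claim_equal_build_input_from_map := by
  intro edges _
  unfold Spec_build_input_from_map build_input_from_map build_input_from_map_alt
  rw [foldA_eq_foldP, foldP_F]
  rfl
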